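-- pv_equiv track=rewrite | github.com/Tekkiech/Computer-Science-A-Level | main-revision_quiz/main.py | _get_available_difficulties
-- ===== SOURCE A (Python) =====
-- def _get_available_difficulties(questions):
--     """Return a sorted list of difficulties present in questions, prefixed by 'Any'."""
--     diffs = set()
--     for q in questions:
--         d = q.get("difficulty")
--         if d is None:
--             continue
--         diffs.add(str(d))
--     # define a preferred ordering if common levels found
--     order = ["Easy", "Medium", "Hard"]
--     present_ordered = [d for d in order if d in diffs]
--     # add any remaining difficulties sorted alphabetically
--     remaining = sorted([d for d in diffs if d not in present_ordered])
--     options = ["Any"] + present_ordered + remaining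
--     return options
-- ===== SOURCE B (Python) =====
-- def _get_available_difficulties(questions):
--     """Return a sorted list of difficulties present in questions, prefixed by 'Any'."""
--     order = ["Easy", "Medium", "Hard"]
--     vals = {str(q["difficulty"]) for q in questions if q.get("difficulty") is not None}
--     key = lambda d: (order.index(d), "") if d in order else (len(order), d)
--     return ["Any"] + sorted(vals, key=key)
-- ===== Notes on version B (the rewrite author's own statement) =====
-- stated objective: simpler
-- what changed: Replaces A's explicit set-building loop plus two-phase ordering (fixed-preference filter pass followed by a separate sorted() over the remainder) with a set comprehension and a single sorted() call whose key ranks Easy/Medium/Hard by position and everything else after them alphabetically.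
import Mathlib
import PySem

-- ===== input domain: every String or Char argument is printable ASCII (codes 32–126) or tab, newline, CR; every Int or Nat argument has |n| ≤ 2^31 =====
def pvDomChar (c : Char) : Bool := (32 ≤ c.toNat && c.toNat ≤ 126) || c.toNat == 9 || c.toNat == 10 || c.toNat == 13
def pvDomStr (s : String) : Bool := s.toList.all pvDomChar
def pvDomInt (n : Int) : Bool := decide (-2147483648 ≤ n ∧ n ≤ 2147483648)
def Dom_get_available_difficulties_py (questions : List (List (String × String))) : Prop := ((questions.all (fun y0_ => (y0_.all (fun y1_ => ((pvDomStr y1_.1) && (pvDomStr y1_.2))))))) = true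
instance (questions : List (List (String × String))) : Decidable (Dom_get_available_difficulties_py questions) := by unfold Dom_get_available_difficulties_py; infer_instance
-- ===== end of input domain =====

-- B replaces A's explicit set-building loop and two-phase ordering (preference filter + separate
-- sorted remainder) by a set comprehension and one keyed sort; same cost, simpler decomposition.

-- ===== PORT A =====
-- A: build the set with a loop, list preferred levels present in their fixed order,
-- then append the remaining difficulties sorted alphabetically.  (str(d) is the identity
-- here since dict values are Strings under the type convention.)
def get_available_difficulties_py (questions : List (List (String × String))) : List String :=
  let diffs : PySem.Set String :=
    questions.foldl (fun diffs q =>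
      match (PySem.Dict.mk q).get? "difficulty" with
      | none => diffs
      | some d => PySem.Set.add diffs d) PySem.Set.empty
  let order : List String := ["Easy", "Medium", "Hard"]
  let present_ordered := order.filter (fun d => PySem.Set.contains diffs d)
  let remaining := PySem.List.sorted (diffs.filter (fun d => !decide (d ∈ present_ordered))) (fun x => x)
  "Any" :: (present_ordered ++ remaining)

-- ===== PORT B =====
-- B: set comprehension over the questions, then a single keyed sort
-- (key = (order.index(d), "") if d in order else (len(order), d)).
def get_available_difficulties_py_alt (questions : List (List (String × String))) : List String :=
  let order : List String := ["Easy", "Medium", "Hard"]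
  let vals : PySem.Set String :=
    PySem.Set.ofList (questions.filterMap (fun q => (PySem.Dict.mk q).get? "difficulty"))
  "Any" :: PySem.List.sorted2 vals
    (fun d => if d ∈ order then (PySem.List.index? order d).getD 0 else order.length)
    (fun d => if d ∈ order then "" else d)

-- ===== PRECONDITION & SPEC =====
def Spec_get_available_difficulties_py (questions : List (List (String × String))) (out : List String) : Prop := out = get_available_difficulties_py_alt questions
instance (questions : List (List (String × String))) (out : List String) : Decidable (Spec_get_available_difficulties_py questions out) := by unfold Spec_get_available_difficulties_py; infer_instance

-- ===== CLAIM (what is proved, stated in full; the proofs are below) =====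
def Claim_equal_get_available_difficulties_py : Prop := ∀ (questions : List (List (String × String))), Dom_get_available_difficulties_py questions → Spec_get_available_difficulties_py questions (get_available_difficulties_py questions)

-- ===== LEMMAS AND PROOFS =====

-- A's set-building loop is Set.ofList of the filterMap of the lookups.
theorem pv_fold_eq_ofList (qs : List (List (String × String))) (acc : PySem.Set String) :
    qs.foldl (fun diffs q =>
      match (PySem.Dict.mk q).get? "difficulty" with
      | none => diffs
      | some d => PySem.Set.add diffs d) acc
    = (qs.filterMap (fun q => (PySem.Dict.mk q).get? "difficulty")).foldl PySem.Set.add acc := by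
  induction qs generalizing acc with
  | nil => rfl
  | cons q qs ih =>
    simp only [List.foldl_cons, List.filterMap_cons]
    cases h : (PySem.Dict.mk q).get? "difficulty" with
    | none => simpa using ih acc
    | some d => simpa using ih (PySem.Set.add acc d)

-- sorted2 with keys k1, k2 is sorted with the lexicographic product key.
theorem pv_sorted2_eq_sorted_lex {α : Type} (xs : List α) (k1 : α → Nat) (k2 : α → String) :
    PySem.List.sorted2 xs k1 k2 = PySem.List.sorted xs (fun x => toLex (k1 x, k2 x)) := by
  have hbefore : (fun a b => decide (k1 a < k1 b) || (!decide (k1 b < k1 a) && decide (k2 a < k2 b)))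
      = (fun a b => decide (toLex (k1 a, k2 a) < toLex (k1 b, k2 b))) := by
    funext a b
    by_cases h1 : k1 a < k1 b
    · simp [Prod.Lex.lt_iff, h1]
    · by_cases h2 : k1 b < k1 a
      · have hR : ¬ (toLex (k1 a, k2 a) < toLex (k1 b, k2 b)) := by
          rw [Prod.Lex.lt_iff]
          simp only [ofLex_toLex]
          rintro (h | ⟨he, -⟩) <;> omega
        simp [h1, h2, hR]
      · have he : k1 a = k1 b := by omega
        simp [Prod.Lex.lt_iff, he]
  calc PySem.List.sorted2 xs k1 k2
      = List.foldl (fun acc x => PySem.List.insertBy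
          (fun a b => decide (toLex (k1 a, k2 a) < toLex (k1 b, k2 b))) x acc) [] xs := by
        rw [← hbefore]; rfl
    _ = PySem.List.sorted xs (fun x => toLex (k1 x, k2 x)) :=
        (PySem.List.sorted_eq_foldl_insertBy xs _).symm

-- The core fact: on any duplicate-free list S, A's two-phase ordering equals B's single keyed sort.
theorem pv_main (S : List String) (hS : S.Nodup) :
    ((["Easy", "Medium", "Hard"] : List String).filter (fun d => PySem.Set.contains S d)) ++
      PySem.List.sorted (S.filter (fun d =>
        !decide (d ∈ (["Easy", "Medium", "Hard"] : List String).filter (fun d => PySem.Set.contains S d)))) (fun x => x)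
    = PySem.List.sorted2 S
        (fun d => if d ∈ (["Easy", "Medium", "Hard"] : List String) then (PySem.List.index? (["Easy", "Medium", "Hard"] : List String) d).getD 0 else (["Easy", "Medium", "Hard"] : List String).length)
        (fun d => if d ∈ (["Easy", "Medium", "Hard"] : List String) then "" else d) := by
  set po := (["Easy", "Medium", "Hard"] : List String).filter (fun d => PySem.Set.contains S d) with hpo
  have hmem_po : ∀ d, d ∈ po ↔ d ∈ (["Easy", "Medium", "Hard"] : List String) ∧ d ∈ S := by
    intro d; simp [hpo, PySem.Set.contains, List.mem_filter]
  set rem := S.filter (fun d => !decide (d ∈ po)) with hrem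
  have hmem_rem : ∀ d, d ∈ rem ↔ d ∈ S ∧ d ∉ (["Easy", "Medium", "Hard"] : List String) := by
    intro d
    simp only [hrem, List.mem_filter, Bool.not_eq_eq_eq_not, Bool.not_true,
      decide_eq_false_iff_not, hmem_po]
    constructor
    · rintro ⟨hdS, hnd⟩; exact ⟨hdS, fun ho => hnd ⟨ho, hdS⟩⟩
    · rintro ⟨hdS, hno⟩; exact ⟨hdS, fun h => hno h.1⟩
  rw [pv_sorted2_eq_sorted_lex]
  symm
  apply PySem.List.sorted_eq_of_perm_of_pairwise_lt
  · -- permutation: po ++ sorted(rem) rearranges S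
    have h1 : po.Perm (S.filter (fun d => decide (d ∈ (["Easy", "Medium", "Hard"] : List String)))) := by
      rw [List.perm_ext_iff_of_nodup (List.Nodup.filter _ (by decide)) (hS.filter _)]
      intro d; rw [hmem_po, List.mem_filter]; simp [And.comm]
    have h2 : (PySem.List.sorted rem (fun x => x)).Perm
        (S.filter (fun d => !decide (d ∈ (["Easy", "Medium", "Hard"] : List String)))) := by
      refine (PySem.List.sorted_perm _ _ _).trans ?_
      rw [List.perm_ext_iff_of_nodup (hS.filter _) (hS.filter _)]
      intro d
      simp only [List.mem_filter, Bool.not_eq_eq_eq_not, Bool.not_true,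
        decide_eq_false_iff_not, List.mem_cons, List.not_mem_nil, or_false,
        hmem_po]
      tauto
    exact (h1.append h2).trans (List.filter_append_perm _ S)
  · -- strictly increasing keys along po ++ sorted(rem)
    rw [List.pairwise_append]
    refine ⟨?_, ?_, ?_⟩
    · -- within the preferred prefix: po is one of 8 literal sublists of the order list
      by_cases hE : PySem.Set.contains S "Easy" <;>
        by_cases hM : PySem.Set.contains S "Medium" <;>
        by_cases hH : PySem.Set.contains S "Hard" <;>
        [skip; skip; skip; skip; skip; skip; skip; skip] <;>
      · first
        | (rw [Bool.not_eq_true] at *) | skip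
        simp only [hpo, List.filter_cons, List.filter_nil, hE, hM, hH, if_true]
        decide
    · -- within the sorted alphabetical tail
      have hnd : (PySem.List.sorted rem (fun x => x)).Pairwise (· ≠ ·) :=
        ((PySem.List.sorted_perm _ _ _).nodup_iff.mpr (hS.filter _))
      have hle : (PySem.List.sorted rem (fun x => x)).Pairwise (fun a b => a ≤ b) :=
        PySem.List.sorted_pairwise _ _
      refine (hle.and hnd).imp_of_mem ?_
      intro a b ha hb hab
      obtain ⟨-, ha2⟩ := (hmem_rem a).mp ((PySem.List.mem_sorted _ _ _ _).mp ha)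
      obtain ⟨-, hb2⟩ := (hmem_rem b).mp ((PySem.List.mem_sorted _ _ _ _).mp hb)
      simp only [Prod.Lex.lt_iff, ofLex_toLex]
      right
      simp only [if_neg ha2, if_neg hb2]
      exact ⟨by trivial, lt_of_le_of_ne hab.1 hab.2⟩
    · -- every preferred level sorts before every remaining difficulty
      intro a ha b hb
      have haO : a ∈ (["Easy", "Medium", "Hard"] : List String) := ((hmem_po a).mp ha).1
      obtain ⟨-, hb2⟩ := (hmem_rem b).mp ((PySem.List.mem_sorted _ _ _ _).mp hb)
      simp only [Prod.Lex.lt_iff, ofLex_toLex]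
      left
      simp only [if_neg hb2]
      fin_cases haO <;> decide

-- ===== VERDICT (by name: the statement is the Claim_ definition above) =====
theorem get_available_difficulties_py_spec : Claim_equal_get_available_difficulties_py := by
  intro questions _
  unfold Spec_get_available_difficulties_py
  simp only [get_available_difficulties_py, get_available_difficulties_py_alt]
  rw [pv_fold_eq_ofList]
  simp only [show (PySem.Set.empty : PySem.Set String) = [] from rfl,
    ← PySem.Set.ofList_eq_foldl]
  exact congrArg ("Any" :: ·) (pv_main _ (PySem.Set.nodup_ofList _))
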